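-- pv_equiv track=rewrite | github.com/jacobandersson86/AoC2024 | day08/resonant_collinearity.py | find_all_anti_nodes
-- ===== SOURCE A (Python) =====
-- import itertools
--
-- def in_map_range(map, position):
--     x, y = position
--     if x < 0 or y < 0:
--         return False
--     if x >= len(map[0]) or y >= len(map):
--         return False
--     return True
--
-- def find_all_anti_nodes(map, positions):
--     anti_nodes = []
--     for (xa, ya), (xb, yb) in itertools.combinations(positions, 2):
--         dx, dy = xb - xa, yb - ya
--
--         anti_nodes.append((xa, ya))
--         anti_nodes.append((xb, yb))
--
--         # Extend in first direction
--         new_pos = (xa - dx, ya - dy)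
--         while in_map_range(map, new_pos):
--             anti_nodes.append(new_pos)
--             x, y = new_pos
--             new_pos = (x - dx, y - dy)
--
--         new_pos = (xb + dx, yb + dy)
--         while in_map_range(map, new_pos):
--             anti_nodes.append(new_pos)
--             x, y = new_pos
--             new_pos = (x + dx, y + dy)
--
--     return anti_nodes
-- ===== SOURCE B (Python) =====
-- def _steps(x, y, dx, dy, width, height):
--     # max k >= 0 such that (x + t*dx, y + t*dy) is on the map for every t = 1..k
--     if not (0 <= x + dx < width and 0 <= y + dy < height):
--         return 0
--     cands = []
--     if dx > 0:
--         cands.append((width - 1 - x) // dx)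
--     elif dx < 0:
--         cands.append(x // (-dx))
--     if dy > 0:
--         cands.append((height - 1 - y) // dy)
--     elif dy < 0:
--         cands.append(y // (-dy))
--     return min(cands) if cands else 0
--
-- def _block(w, h, p, q):
--     (xa, ya), (xb, yb) = p, q
--     dx, dy = xb - xa, yb - ya
--     k1 = _steps(xa, ya, -dx, -dy, w, h)
--     k2 = _steps(xb, yb, dx, dy, w, h)
--     return ([p, q]
--             + [(xa + t * -dx, ya + t * -dy) for t in range(1, k1 + 1)]
--             + [(xb + t * dx, yb + t * dy) for t in range(1, k2 + 1)])
--
-- def find_all_anti_nodes(map, positions):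
--     h = len(map)
--     w = len(map[0]) if map else 0
--     out = []
--     rest = list(positions)
--     while rest:
--         p = rest.pop(0)
--         for q in rest:
--             out += _block(w, h, p, q)
--     return out
-- ===== Notes on version B (the rewrite author's own statement) =====
-- stated objective: alternative
-- what changed: replaces the membership-tested point-by-point while-walks of A with a closed-form floor-division step count per direction (per axis, from the sign of the step) followed by a direct emission of the points for t=1..k, and replaces itertools.combinations by a head/rest loop
-- outside the precondition, e.g. on find_all_anti_nodes([], [(-5, -1), (-6, -2)]): A returns [(-5, -1), (-6, -2)], B returns [(-5, -1), (-6, -2)]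
import Mathlib
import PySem

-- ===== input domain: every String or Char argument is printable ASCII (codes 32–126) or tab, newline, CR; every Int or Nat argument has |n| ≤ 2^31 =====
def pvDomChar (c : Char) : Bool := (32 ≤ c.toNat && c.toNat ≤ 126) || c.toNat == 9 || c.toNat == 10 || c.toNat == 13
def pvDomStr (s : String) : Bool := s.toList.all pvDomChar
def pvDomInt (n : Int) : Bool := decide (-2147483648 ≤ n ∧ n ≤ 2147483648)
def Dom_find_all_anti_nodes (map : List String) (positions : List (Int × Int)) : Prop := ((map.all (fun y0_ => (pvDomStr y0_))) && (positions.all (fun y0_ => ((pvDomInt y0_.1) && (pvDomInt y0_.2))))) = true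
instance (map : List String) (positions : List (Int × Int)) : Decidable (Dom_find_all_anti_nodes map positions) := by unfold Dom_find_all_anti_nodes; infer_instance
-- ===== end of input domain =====

-- B replaces A's membership-tested point-by-point anti-node walks by a closed-form
-- floor-division step count per direction followed by a direct range emission (objective: alternative).

-- map width (len(map[0]); 0 for an empty map) and height (len(map)) as Ints
def mapW (map : List String) : Int := ((map.headD "").toList.length : Int)
def mapH (map : List String) : Int := (map.length : Int)

-- ===== PORT A =====
-- A's in_map_range; on map = [] Python's len(map[0]) raises IndexError once x ≥ 0 ∧ y ≥ 0 —
-- Pre_ excludes the empty map (headD "" stands in for map[0] there)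
def in_map_range (map : List String) (position : Int × Int) : Bool :=
  if position.1 < 0 || position.2 < 0 then false
  else if position.1 ≥ mapW map || position.2 ≥ mapH map then false
  else true

-- A's while-loop: append new_pos while in range, stepping by (dx,dy).  The fuel argument only
-- bounds the recursion; width+height+1 iterations suffice for every terminating run of A
-- (A loops forever when dx = dy = 0 on an in-range point; Pre_ excludes those inputs).
def walkA (map : List String) (dx dy : Int) : Int × Int → Nat → List (Int × Int)
  | _, 0 => []
  | pos, fuel+1 =>
      if in_map_range map pos then pos :: walkA map dx dy (pos.1 + dx, pos.2 + dy) fuel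
      else []

-- itertools.combinations(positions, 2), in Python's order
def combinations2 : List (Int × Int) → List ((Int × Int) × (Int × Int))
  | [] => []
  | p :: rest => rest.map (fun q => (p, q)) ++ combinations2 rest

def find_all_anti_nodes (map : List String) (positions : List (Int × Int)) : List (Int × Int) :=
  (combinations2 positions).foldl (fun anti_nodes pq =>
    let xa := pq.1.1; let ya := pq.1.2; let xb := pq.2.1; let yb := pq.2.2
    let dx := xb - xa; let dy := yb - ya
    ((anti_nodes ++ [(xa, ya)]) ++ [(xb, yb)])
      ++ walkA map (-dx) (-dy) (xa - dx, ya - dy) ((map.headD "").toList.length + map.length + 1)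
      ++ walkA map dx dy (xb + dx, yb + dy) ((map.headD "").toList.length + map.length + 1)) []

-- ===== PORT B =====
-- Source B's _steps: max k ≥ 0 with (x+t*dx, y+t*dy) on the map for all t = 1..k, in closed form
def stepsB (x y dx dy w h : Int) : Int :=
  if ¬ (0 ≤ x + dx ∧ x + dx < w ∧ 0 ≤ y + dy ∧ y + dy < h) then 0
  else
    let cands : List Int :=
      (if 0 < dx then [PySem.Int.floordiv (w - 1 - x) dx]
       else if dx < 0 then [PySem.Int.floordiv x (-dx)] else []) ++
      (if 0 < dy then [PySem.Int.floordiv (h - 1 - y) dy]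
       else if dy < 0 then [PySem.Int.floordiv y (-dy)] else [])
    match PySem.List.min? cands (fun v => v) with
    | some m => m
    | none => 0

-- Source B's _block
def blockB (w h : Int) (p q : Int × Int) : List (Int × Int) :=
  let dx := q.1 - p.1; let dy := q.2 - p.2
  let k1 := stepsB p.1 p.2 (-dx) (-dy) w h
  let k2 := stepsB q.1 q.2 dx dy w h
  ([p, q]
    ++ (PySem.List.pyRange 1 (k1 + 1) 1).map (fun t => (p.1 + t * (-dx), p.2 + t * (-dy)))
    ++ (PySem.List.pyRange 1 (k2 + 1) 1).map (fun t => (q.1 + t * dx, q.2 + t * dy)))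

-- Source B's while rest: p = rest.pop(0); for q in rest: out += _block(...)
def goB (w h : Int) : List (Int × Int) → List (Int × Int)
  | [] => []
  | p :: rest => rest.foldl (fun out q => out ++ blockB w h p q) [] ++ goB w h rest

def find_all_anti_nodes_alt (map : List String) (positions : List (Int × Int)) : List (Int × Int) :=
  goB (mapW map) (mapH map) positions

-- ===== PRECONDITION & SPEC =====
-- Pre_ excludes (i) an empty map together with ≥ 2 positions, where A's len(map[0]) raises
-- IndexError as soon as any probed point has both coordinates nonnegative (on the few such
-- inputs whose probed points all keep a negative coordinate A still returns — see the cite);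
-- (ii) a duplicated in-range position, on which A's while-loop runs forever (dx = dy = 0).
def Pre_find_all_anti_nodes (map : List String) (positions : List (Int × Int)) : Prop :=
  (positions.length ≤ 1 ∨ map ≠ []) ∧
  ∀ p ∈ positions, 2 ≤ positions.count p →
    ¬ (0 ≤ p.1 ∧ p.1 < mapW map ∧ 0 ≤ p.2 ∧ p.2 < mapH map)

instance (map : List String) (positions : List (Int × Int)) : Decidable (Pre_find_all_anti_nodes map positions) := by
  unfold Pre_find_all_anti_nodes; infer_instance

def pvWitness_find_all_anti_nodes : List String × (List (Int × Int)) :=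
  (["ab", "cd"], [(0, 0), (1, 1)])

def Spec_find_all_anti_nodes (map : List String) (positions : List (Int × Int)) (out : List (Int × Int)) : Prop := out = find_all_anti_nodes_alt map positions
instance (map : List String) (positions : List (Int × Int)) (out : List (Int × Int)) : Decidable (Spec_find_all_anti_nodes map positions out) := by unfold Spec_find_all_anti_nodes; infer_instance

-- ===== CLAIM (what is proved, stated in full; the proofs are below) =====
def Claim_equal_find_all_anti_nodes : Prop := ∀ (map : List String) (positions : List (Int × Int)), Dom_find_all_anti_nodes map positions → Pre_find_all_anti_nodes map positions → Spec_find_all_anti_nodes map positions (find_all_anti_nodes map positions)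

-- ===== LEMMAS AND PROOFS =====

lemma in_map_range_iff (map : List String) (x y : Int) :
    in_map_range map (x, y) = true ↔ (0 ≤ x ∧ x < mapW map ∧ 0 ≤ y ∧ y < mapH map) := by
  simp only [in_map_range]
  split_ifs with h1 h2 <;> simp_all <;> omega

lemma in_map_range_false (map : List String) (x y : Int)
    (h : ¬ (0 ≤ x ∧ x < mapW map ∧ 0 ≤ y ∧ y < mapH map)) :
    in_map_range map (x, y) = false := by
  rw [Bool.eq_false_iff, Ne, in_map_range_iff]; exact h

lemma mapW_nonneg (map : List String) : 0 ≤ mapW map := by simp [mapW]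
lemma mapH_nonneg (map : List String) : 0 ≤ mapH map := by simp [mapH]

-- certificate that c is the exact number of further in-range steps along one axis
def AxC (x d w c : Int) : Prop :=
  1 ≤ c ∧ (∀ t : Int, 1 ≤ t → t ≤ c → 0 ≤ x + t * d ∧ x + t * d < w) ∧
  ¬ (0 ≤ x + (c + 1) * d ∧ x + (c + 1) * d < w) ∧ c ≤ w

lemma axc_pos (x w d : Int) (hd : 0 < d) (h0 : 0 ≤ x + d) (h1 : x + d < w) :
    AxC x d w (PySem.Int.floordiv (w - 1 - x) d) := by
  have hc := (PySem.Int.floordiv_eq_iff_of_pos hd (q := PySem.Int.floordiv (w - 1 - x) d)).mp rfl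
  set c := PySem.Int.floordiv (w - 1 - x) d with hcdef
  obtain ⟨hlo, hhi⟩ := hc
  have hc1 : 1 ≤ c := by nlinarith
  refine ⟨hc1, fun t ht1 htc => ⟨by nlinarith, ?_⟩, fun hv => by nlinarith [hv.2], by nlinarith⟩
  nlinarith [mul_le_mul_of_nonneg_right htc hd.le]

lemma axc_neg (x w d : Int) (hd : d < 0) (h0 : 0 ≤ x + d) (h1 : x + d < w) :
    AxC x d w (PySem.Int.floordiv x (-d)) := by
  have hdpos : 0 < -d := by omega
  have hc := (PySem.Int.floordiv_eq_iff_of_pos hdpos (q := PySem.Int.floordiv x (-d))).mp rfl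
  set c := PySem.Int.floordiv x (-d) with hcdef
  obtain ⟨hlo, hhi⟩ := hc
  have hc1 : 1 ≤ c := by nlinarith
  refine ⟨hc1, fun t ht1 htc => ⟨?_, by nlinarith⟩, fun hv => by nlinarith [hv.1], by nlinarith⟩
  nlinarith [mul_le_mul_of_nonneg_right htc hdpos.le]

-- assembling the walk facts for k when both axes move
lemma facts_two (map : List String) (x0 y0 dx dy c1 c2 : Int)
    (h1 : AxC x0 dx (mapW map) c1) (h2 : AxC y0 dy (mapH map) c2) :
    0 ≤ min c1 c2 ∧ min c1 c2 ≤ mapW map + mapH map ∧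
    (∀ t : Int, 1 ≤ t → t ≤ min c1 c2 → in_map_range map (x0 + t * dx, y0 + t * dy) = true) ∧
    in_map_range map (x0 + (min c1 c2 + 1) * dx, y0 + (min c1 c2 + 1) * dy) = false := by
  obtain ⟨ha1, ha2, ha3, ha4⟩ := h1
  obtain ⟨hb1, hb2, hb3, hb4⟩ := h2
  have hh := mapH_nonneg map
  refine ⟨by omega, by omega, fun t ht1 ht2 => ?_, ?_⟩
  · rw [in_map_range_iff]
    obtain ⟨u1, u2⟩ := ha2 t ht1 (le_trans ht2 (min_le_left _ _))
    obtain ⟨v1, v2⟩ := hb2 t ht1 (le_trans ht2 (min_le_right _ _))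
    exact ⟨u1, u2, v1, v2⟩
  · apply in_map_range_false
    rcases min_choice c1 c2 with hm | hm <;> rw [hm]
    · intro ⟨u1, u2, _, _⟩; exact ha3 ⟨u1, u2⟩
    · intro ⟨_, _, v1, v2⟩; exact hb3 ⟨v1, v2⟩

-- the walk facts when only the x axis moves (dy = 0), and symmetrically
lemma facts_x (map : List String) (x0 y0 dx c1 : Int)
    (h1 : AxC x0 dx (mapW map) c1) (hy : 0 ≤ y0 ∧ y0 < mapH map) :
    0 ≤ c1 ∧ c1 ≤ mapW map + mapH map ∧
    (∀ t : Int, 1 ≤ t → t ≤ c1 → in_map_range map (x0 + t * dx, y0 + t * 0) = true) ∧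
    in_map_range map (x0 + (c1 + 1) * dx, y0 + (c1 + 1) * 0) = false := by
  obtain ⟨ha1, ha2, ha3, ha4⟩ := h1
  have hh := mapH_nonneg map
  refine ⟨by omega, by omega, fun t ht1 ht2 => ?_, ?_⟩
  · rw [in_map_range_iff]
    obtain ⟨u1, u2⟩ := ha2 t ht1 ht2
    exact ⟨u1, u2, by omega, by omega⟩
  · apply in_map_range_false
    intro ⟨u1, u2, _, _⟩; exact ha3 ⟨u1, u2⟩

lemma facts_y (map : List String) (x0 y0 dy c2 : Int)
    (h2 : AxC y0 dy (mapH map) c2) (hx : 0 ≤ x0 ∧ x0 < mapW map) :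
    0 ≤ c2 ∧ c2 ≤ mapW map + mapH map ∧
    (∀ t : Int, 1 ≤ t → t ≤ c2 → in_map_range map (x0 + t * 0, y0 + t * dy) = true) ∧
    in_map_range map (x0 + (c2 + 1) * 0, y0 + (c2 + 1) * dy) = false := by
  obtain ⟨hb1, hb2, hb3, hb4⟩ := h2
  have hw := mapW_nonneg map
  refine ⟨by omega, by omega, fun t ht1 ht2 => ?_, ?_⟩
  · rw [in_map_range_iff]
    obtain ⟨v1, v2⟩ := hb2 t ht1 ht2
    exact ⟨by omega, by omega, v1, v2⟩
  · apply in_map_range_false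
    intro ⟨_, _, v1, v2⟩; exact hb3 ⟨v1, v2⟩

-- generic unrolling: if steps 1..k are in range and step k+1 is not, the walk is the range map
lemma walkA_run_aux (map : List String) (dx dy x0 y0 k : Int)
    (hin : ∀ t : Int, 1 ≤ t → t ≤ k → in_map_range map (x0 + t * dx, y0 + t * dy) = true)
    (hout : in_map_range map (x0 + (k + 1) * dx, y0 + (k + 1) * dy) = false) :
    ∀ (fuel : Nat) (j : Int), 1 ≤ j → j ≤ k + 1 → k + 1 - j < (fuel : Int) →
      walkA map dx dy (x0 + j * dx, y0 + j * dy) fuel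
        = (PySem.List.pyRange j (k + 1) 1).map (fun t => (x0 + t * dx, y0 + t * dy)) := by
  intro fuel
  induction fuel with
  | zero => intro j h1 h2 h3; simp at h3; omega
  | succ n ih =>
    intro j h1 h2 h3
    by_cases hj : j = k + 1
    · subst hj
      simp [walkA, hout, PySem.List.pyRange_one_eq_nil (le_refl (k + 1))]
    · have hjk : j ≤ k := by omega
      have hstep : (x0 + j * dx + dx, y0 + j * dy + dy) = (x0 + (j + 1) * dx, y0 + (j + 1) * dy) := by
        simp only [Prod.mk.injEq]; constructor <;> ring
      rw [PySem.List.pyRange_one_cons (show j < k + 1 by omega), List.map_cons]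
      rw [show walkA map dx dy (x0 + j * dx, y0 + j * dy) (n + 1)
            = (x0 + j * dx, y0 + j * dy) :: walkA map dx dy (x0 + (j + 1) * dx, y0 + (j + 1) * dy) n by
            simp [walkA, hin j h1 hjk, hstep]]
      rw [ih (j + 1) (by omega) (by omega) (by push_cast at h3 ⊢; omega)]

-- the walk from base+(dx,dy) equals B's closed-form emission, provided the walk terminates
lemma walk_eq (map : List String) (x0 y0 dx dy : Int)
    (hz : (dx = 0 ∧ dy = 0) → ¬ (0 ≤ x0 ∧ x0 < mapW map ∧ 0 ≤ y0 ∧ y0 < mapH map)) :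
    walkA map dx dy (x0 + dx, y0 + dy) ((map.headD "").toList.length + map.length + 1)
      = (PySem.List.pyRange 1 (stepsB x0 y0 dx dy (mapW map) (mapH map) + 1) 1).map
          (fun t => (x0 + t * dx, y0 + t * dy)) := by
  have hfuel : ((((map.headD "").toList.length + map.length + 1 : Nat)) : Int) = mapW map + mapH map + 1 := by
    simp [mapW, mapH]
  by_cases hg : 0 ≤ x0 + dx ∧ x0 + dx < mapW map ∧ 0 ≤ y0 + dy ∧ y0 + dy < mapH map
  · obtain ⟨hg1, hg2, hg3, hg4⟩ := hg
    have hrun : ∀ kk : Int, stepsB x0 y0 dx dy (mapW map) (mapH map) = kk →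
        0 ≤ kk → kk ≤ mapW map + mapH map →
        (∀ t : Int, 1 ≤ t → t ≤ kk → in_map_range map (x0 + t * dx, y0 + t * dy) = true) →
        in_map_range map (x0 + (kk + 1) * dx, y0 + (kk + 1) * dy) = false →
        walkA map dx dy (x0 + dx, y0 + dy) ((map.headD "").toList.length + map.length + 1)
          = (PySem.List.pyRange 1 (stepsB x0 y0 dx dy (mapW map) (mapH map) + 1) 1).map
              (fun t => (x0 + t * dx, y0 + t * dy)) := by
      intro kk hk hk0 hkb hin hout
      rw [hk]
      have := walkA_run_aux map dx dy x0 y0 kk hin hout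
        ((map.headD "").toList.length + map.length + 1) 1 le_rfl (by omega) (by rw [hfuel]; omega)
      simpa using this
    have hP : ¬¬ (0 ≤ x0 + dx ∧ x0 + dx < mapW map ∧ 0 ≤ y0 + dy ∧ y0 + dy < mapH map) :=
      not_not_intro ⟨hg1, hg2, hg3, hg4⟩
    rcases lt_trichotomy dx 0 with hdx | hdx | hdx <;> rcases lt_trichotomy dy 0 with hdy | hdy | hdy
    · -- dx < 0, dy < 0
      have hX := axc_neg x0 (mapW map) dx hdx hg1 hg2
      have hY := axc_neg y0 (mapH map) dy hdy hg3 hg4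
      obtain ⟨f0, f1, f2, f3⟩ := facts_two map x0 y0 dx dy _ _ hX hY
      refine hrun _ ?_ f0 f1 f2 f3
      simp only [stepsB, if_neg hP]
      rw [if_neg (by omega), if_pos hdx, if_neg (by omega), if_pos hdy]
      simp [PySem.List.min?_id_cons]
    · -- dx < 0, dy = 0
      subst hdy
      have hX := axc_neg x0 (mapW map) dx hdx hg1 hg2
      obtain ⟨f0, f1, f2, f3⟩ := facts_x map x0 y0 dx _ hX (by constructor <;> omega)
      refine hrun _ ?_ f0 f1 f2 f3
      simp only [stepsB, if_neg hP]
      rw [if_neg (by omega), if_pos hdx]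
      simp [PySem.List.min?_id_cons]
    · -- dx < 0, 0 < dy
      have hX := axc_neg x0 (mapW map) dx hdx hg1 hg2
      have hY := axc_pos y0 (mapH map) dy hdy hg3 hg4
      obtain ⟨f0, f1, f2, f3⟩ := facts_two map x0 y0 dx dy _ _ hX hY
      refine hrun _ ?_ f0 f1 f2 f3
      simp only [stepsB, if_neg hP]
      rw [if_neg (by omega), if_pos hdx, if_pos hdy]
      simp [PySem.List.min?_id_cons]
    · -- dx = 0, dy < 0
      subst hdx
      have hY := axc_neg y0 (mapH map) dy hdy hg3 hg4
      obtain ⟨f0, f1, f2, f3⟩ := facts_y map x0 y0 dy _ hY (by constructor <;> omega)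
      refine hrun _ ?_ f0 f1 f2 f3
      simp only [stepsB, if_neg hP]
      rw [if_neg (by omega), if_neg (by omega), if_neg (by omega), if_pos hdy]
      simp [PySem.List.min?_id_cons]
    · -- dx = 0, dy = 0: excluded
      subst hdx; subst hdy
      exact absurd ⟨by omega, by omega, by omega, by omega⟩ (hz ⟨rfl, rfl⟩)
    · -- dx = 0, 0 < dy
      subst hdx
      have hY := axc_pos y0 (mapH map) dy hdy hg3 hg4
      obtain ⟨f0, f1, f2, f3⟩ := facts_y map x0 y0 dy _ hY (by constructor <;> omega)
      refine hrun _ ?_ f0 f1 f2 f3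
      simp only [stepsB, if_neg hP]
      rw [if_neg (by omega), if_neg (by omega), if_pos hdy]
      simp [PySem.List.min?_id_cons]
    · -- 0 < dx, dy < 0
      have hX := axc_pos x0 (mapW map) dx hdx hg1 hg2
      have hY := axc_neg y0 (mapH map) dy hdy hg3 hg4
      obtain ⟨f0, f1, f2, f3⟩ := facts_two map x0 y0 dx dy _ _ hX hY
      refine hrun _ ?_ f0 f1 f2 f3
      simp only [stepsB, if_neg hP]
      rw [if_pos hdx, if_neg (by omega), if_pos hdy]
      simp [PySem.List.min?_id_cons]
    · -- 0 < dx, dy = 0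
      subst hdy
      have hX := axc_pos x0 (mapW map) dx hdx hg1 hg2
      obtain ⟨f0, f1, f2, f3⟩ := facts_x map x0 y0 dx _ hX (by constructor <;> omega)
      refine hrun _ ?_ f0 f1 f2 f3
      simp only [stepsB, if_neg hP]
      rw [if_pos hdx]
      simp [PySem.List.min?_id_cons]
    · -- 0 < dx, 0 < dy
      have hX := axc_pos x0 (mapW map) dx hdx hg1 hg2
      have hY := axc_pos y0 (mapH map) dy hdy hg3 hg4
      obtain ⟨f0, f1, f2, f3⟩ := facts_two map x0 y0 dx dy _ _ hX hY
      refine hrun _ ?_ f0 f1 f2 f3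
      simp only [stepsB, if_neg hP]
      rw [if_pos hdx, if_pos hdy]
      simp [PySem.List.min?_id_cons]
  · have hs : stepsB x0 y0 dx dy (mapW map) (mapH map) = 0 := by simp [stepsB, hg]
    rw [hs]
    have hf : in_map_range map (x0 + dx, y0 + dy) = false := in_map_range_false map _ _ hg
    simp [walkA, hf, PySem.List.pyRange_one_eq_nil (le_refl 1)]

-- pairs produced by combinations2 are members of the list
lemma mem_combinations2 {l : List (Int × Int)} {p q : Int × Int}
    (hm : (p, q) ∈ combinations2 l) : p ∈ l ∧ q ∈ l := by
  induction l with
  | nil => simp [combinations2] at hm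
  | cons a rest ih =>
    simp only [combinations2, List.mem_append, List.mem_map] at hm
    rcases hm with ⟨x, hx, hxy⟩ | hm
    · injection hxy with h1 h2
      subst h1; subst h2
      exact ⟨by simp, List.mem_cons_of_mem _ hx⟩
    · exact ⟨List.mem_cons_of_mem _ (ih hm).1, List.mem_cons_of_mem _ (ih hm).2⟩

-- an equal pair can only come from a duplicated element
lemma mem_combinations2_dup {l : List (Int × Int)} {p : Int × Int}
    (hm : (p, p) ∈ combinations2 l) : 2 ≤ l.count p := by
  induction l with
  | nil => simp [combinations2] at hm
  | cons a rest ih =>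
    simp only [combinations2, List.mem_append, List.mem_map] at hm
    rcases hm with ⟨x, hx, hxy⟩ | hm
    · injection hxy with h1 h2
      subst h2; subst h1
      have hc : 1 ≤ rest.count a := List.count_pos_iff.mpr hx
      rw [List.count_cons]
      split_ifs <;> simp_all
    · have hc := ih hm
      rw [List.count_cons]
      split_ifs <;> omega

lemma flatMap_congr {α β : Type} {l : List α} {f g : α → List β}
    (h : ∀ x ∈ l, f x = g x) : l.flatMap f = l.flatMap g := by
  induction l with
  | nil => rfl
  | cons a t ih =>
    simp only [List.flatMap_cons]
    rw [h a (by simp), ih (fun x hx => h x (by simp [hx]))]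

-- A as a flatMap over the pair list
lemma A_flat (map : List String) (positions : List (Int × Int)) :
    find_all_anti_nodes map positions
      = (combinations2 positions).flatMap (fun pq =>
          [pq.1, pq.2]
            ++ walkA map (-(pq.2.1 - pq.1.1)) (-(pq.2.2 - pq.1.2))
                 (pq.1.1 - (pq.2.1 - pq.1.1), pq.1.2 - (pq.2.2 - pq.1.2))
                 ((map.headD "").toList.length + map.length + 1)
            ++ walkA map (pq.2.1 - pq.1.1) (pq.2.2 - pq.1.2)
                 (pq.2.1 + (pq.2.1 - pq.1.1), pq.2.2 + (pq.2.2 - pq.1.2))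
                 ((map.headD "").toList.length + map.length + 1)) := by
  unfold find_all_anti_nodes
  rw [show (fun (anti_nodes : List (Int × Int)) (pq : (Int × Int) × (Int × Int)) =>
        let xa := pq.1.1; let ya := pq.1.2; let xb := pq.2.1; let yb := pq.2.2
        let dx := xb - xa; let dy := yb - ya
        ((anti_nodes ++ [(xa, ya)]) ++ [(xb, yb)])
          ++ walkA map (-dx) (-dy) (xa - dx, ya - dy) ((map.headD "").toList.length + map.length + 1)
          ++ walkA map dx dy (xb + dx, yb + dy) ((map.headD "").toList.length + map.length + 1))
      = (fun anti_nodes pq => anti_nodes ++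
          ([pq.1, pq.2]
            ++ walkA map (-(pq.2.1 - pq.1.1)) (-(pq.2.2 - pq.1.2))
                 (pq.1.1 - (pq.2.1 - pq.1.1), pq.1.2 - (pq.2.2 - pq.1.2))
                 ((map.headD "").toList.length + map.length + 1)
            ++ walkA map (pq.2.1 - pq.1.1) (pq.2.2 - pq.1.2)
                 (pq.2.1 + (pq.2.1 - pq.1.1), pq.2.2 + (pq.2.2 - pq.1.2))
                 ((map.headD "").toList.length + map.length + 1))) from by
      funext acc pq; simp]
  rw [PySem.List.foldl_append_eq_flatMap]
  simp

-- B as a flatMap over the same pair list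
lemma B_flat (w h : Int) (l : List (Int × Int)) :
    goB w h l = (combinations2 l).flatMap (fun pq => blockB w h pq.1 pq.2) := by
  induction l with
  | nil => simp [goB, combinations2]
  | cons p rest ih =>
    simp only [goB, combinations2, List.flatMap_append]
    rw [PySem.List.foldl_append_eq_flatMap, ih]
    simp [List.flatMap_map]

-- ===== VERDICT (by name: the statement is the Claim_ definition above) =====
theorem find_all_anti_nodes_spec : Claim_equal_find_all_anti_nodes := by
  intro map positions _ hpre
  unfold Spec_find_all_anti_nodes find_all_anti_nodes_alt
  rw [A_flat, B_flat]
  apply flatMap_congr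
  rintro ⟨⟨xa, ya⟩, ⟨xb, yb⟩⟩ hmem
  obtain ⟨hp, hq⟩ := mem_combinations2 hmem
  have hdup : xa = xb → ya = yb → ¬ (0 ≤ xa ∧ xa < mapW map ∧ 0 ≤ ya ∧ ya < mapH map) := by
    intro h1 h2
    subst h1; subst h2
    exact hpre.2 _ hp (mem_combinations2_dup hmem)
  simp only [blockB]
  rw [show ((xa, ya).1 - ((xb, yb).1 - (xa, ya).1), (xa, ya).2 - ((xb, yb).2 - (xa, ya).2))
        = (xa + -(xb - xa), ya + -(yb - ya)) by simp only [Prod.mk.injEq]; constructor <;> ring]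
  rw [walk_eq map xa ya (-(xb - xa)) (-(yb - ya)) (fun hd => hdup (by omega) (by omega))]
  rw [walk_eq map xb yb (xb - xa) (yb - ya) (by
        intro hd
        have h1 : xa = xb := by omega
        have h2 : ya = yb := by omega
        subst h1; subst h2
        exact hdup rfl rfl)]
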